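-- pv_equiv track=rewrite | github.com/daniel-reich/ubiquitous-fiesta | Bb9hTXYuvqx3aCm8d_21.py | alpha_clash
-- ===== SOURCE A (Python) =====
-- def alpha_clash(str_A, ind_A, str_Z, ind_Z):
--     score = {'A': 0, 'Z': 0}
--     A = [x for i, x in enumerate(str_A) if i not in set(ind_Z)]
--     Z = [y for j, y in enumerate(str_Z) if j not in set(ind_A)]
--     for a, z in zip(A, Z):
--         val = ord(a) - ord(z)
--         if val > 0:
--             score['A'] += val
--         elif val < 0:
--             score['Z'] -= val
--     return score
-- ===== SOURCE B (Python) =====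
-- def alpha_clash(str_A, ind_A, str_Z, ind_Z):
--     skip_a = set(ind_Z)
--     skip_z = set(ind_A)
--     n_a, n_z = len(str_A), len(str_Z)
--     sa = sz = 0
--     i = j = 0
--     while i < n_a and j < n_z:
--         if i in skip_a:
--             i += 1
--         elif j in skip_z:
--             j += 1
--         else:
--             val = ord(str_A[i]) - ord(str_Z[j])
--             if val > 0:
--                 sa += val
--             elif val < 0:
--                 sz -= val
--             i += 1
--             j += 1
--     return {'A': sa, 'Z': sz}
-- ===== Notes on version B (the rewrite author's own statement) =====
-- stated objective: faster
-- what changed: Replaces the two filtered intermediate lists plus zip with a single two-pointer while loop over both strings that skips excluded indices and scores pairs in place, building the skip sets once instead of per character.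
import Mathlib
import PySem

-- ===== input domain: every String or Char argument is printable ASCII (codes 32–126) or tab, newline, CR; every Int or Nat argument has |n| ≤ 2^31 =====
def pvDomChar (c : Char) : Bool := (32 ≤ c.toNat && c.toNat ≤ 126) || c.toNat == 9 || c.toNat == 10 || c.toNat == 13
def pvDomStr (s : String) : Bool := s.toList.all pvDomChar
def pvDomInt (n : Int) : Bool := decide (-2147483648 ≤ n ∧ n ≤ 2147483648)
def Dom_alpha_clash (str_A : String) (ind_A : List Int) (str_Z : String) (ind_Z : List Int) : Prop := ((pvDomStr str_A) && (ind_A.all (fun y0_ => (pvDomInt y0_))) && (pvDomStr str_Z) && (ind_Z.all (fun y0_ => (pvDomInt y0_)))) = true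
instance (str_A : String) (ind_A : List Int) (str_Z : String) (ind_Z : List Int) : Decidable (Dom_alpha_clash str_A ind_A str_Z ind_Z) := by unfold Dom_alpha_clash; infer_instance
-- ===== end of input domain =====

-- B replaces the two filtered list comprehensions + zip by a single two-pointer loop
-- over both strings (skip sets built once); objective: faster (avoids per-character set rebuilds).

-- ===== PORT A =====
def alpha_clash (str_A : String) (ind_A : List Int) (str_Z : String) (ind_Z : List Int) : List (String × Int) :=
  let score : PySem.Dict String Int := PySem.Dict.ofList [("A", 0), ("Z", 0)]
  let A : List Char :=
    ((PySem.List.enumerate str_A.toList 0).filter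
      (fun p => !(PySem.Set.ofList ind_Z).contains p.1)).map (·.2)
  let Z : List Char :=
    ((PySem.List.enumerate str_Z.toList 0).filter
      (fun p => !(PySem.Set.ofList ind_A).contains p.1)).map (·.2)
  let score := (A.zip Z).foldl
    (fun sc (az : Char × Char) =>
      let val : Int := (az.1.toNat : Int) - (az.2.toNat : Int)
      if val > 0 then sc.modify "A" 0 (· + val)
      else if val < 0 then sc.modify "Z" 0 (· - val)
      else sc) score
  score.items

-- ===== PORT B =====
-- the two-pointer while loop of Source B: cursor i over str_A, j over str_Z, skipping excluded indices
def alphaGo (sA sZ : List Char) (skipA skipZ : PySem.Set Int)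
    (i j : Nat) (sa sz : Int) : Int × Int :=
  if h : i < sA.length ∧ j < sZ.length then
    if skipA.contains (i : Int) then alphaGo sA sZ skipA skipZ (i+1) j sa sz
    else if skipZ.contains (j : Int) then alphaGo sA sZ skipA skipZ i (j+1) sa sz
    else
      let val : Int := ((sA[i]'h.1).toNat : Int) - ((sZ[j]'h.2).toNat : Int)
      if val > 0 then alphaGo sA sZ skipA skipZ (i+1) (j+1) (sa + val) sz
      else if val < 0 then alphaGo sA sZ skipA skipZ (i+1) (j+1) sa (sz - val)
      else alphaGo sA sZ skipA skipZ (i+1) (j+1) sa sz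
  else (sa, sz)
termination_by (sA.length - i) + (sZ.length - j)
decreasing_by all_goals omega

def alpha_clash_alt (str_A : String) (ind_A : List Int) (str_Z : String) (ind_Z : List Int) : List (String × Int) :=
  let skipA : PySem.Set Int := PySem.Set.ofList ind_Z
  let skipZ : PySem.Set Int := PySem.Set.ofList ind_A
  let r := alphaGo str_A.toList str_Z.toList skipA skipZ 0 0 0 0
  [("A", r.1), ("Z", r.2)]

-- ===== PRECONDITION & SPEC =====
def Spec_alpha_clash (str_A : String) (ind_A : List Int) (str_Z : String) (ind_Z : List Int) (out : List (String × Int)) : Prop := out = alpha_clash_alt str_A ind_A str_Z ind_Z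
instance (str_A : String) (ind_A : List Int) (str_Z : String) (ind_Z : List Int) (out : List (String × Int)) : Decidable (Spec_alpha_clash str_A ind_A str_Z ind_Z out) := by unfold Spec_alpha_clash; infer_instance

-- ===== CLAIM (what is proved, stated in full; the proofs are below) =====
def Claim_equal_alpha_clash : Prop := ∀ (str_A : String) (ind_A : List Int) (str_Z : String) (ind_Z : List Int), Dom_alpha_clash str_A ind_A str_Z ind_Z → Spec_alpha_clash str_A ind_A str_Z ind_Z (alpha_clash str_A ind_A str_Z ind_Z)

-- ===== LEMMAS AND PROOFS =====

-- step function: one zip-pair's effect on the (scoreA, scoreZ) accumulator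
def acStep (s : Int × Int) (p : Char × Char) : Int × Int :=
  let val : Int := (p.1.toNat : Int) - (p.2.toNat : Int)
  if val > 0 then (s.1 + val, s.2)
  else if val < 0 then (s.1, s.2 - val)
  else s

-- filtered suffix of cs whose positions start at index i, skipping indices in `skip`
def filtFrom (skip : List Int) : List Char → Nat → List Char
  | [], _ => []
  | c :: cs, i => if skip.contains (i : Int) then filtFrom skip cs (i+1)
                  else c :: filtFrom skip cs (i+1)

theorem ofList_contains (l : List Int) (x : Int) :
    (PySem.Set.ofList l).contains x = l.contains x := by
  by_cases h : x ∈ l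
  · have h2 : x ∈ PySem.Set.ofList l := (PySem.Set.mem_ofList l x).2 h
    simp [PySem.Set.contains_eq_listContains, h, h2]
  · have h2 : x ∉ PySem.Set.ofList l := fun hc => h ((PySem.Set.mem_ofList l x).1 hc)
    simp [PySem.Set.contains_eq_listContains, h, h2]

theorem enumerate_filter_eq_filtFrom (skip : List Int) (cs : List Char) (i : Nat) :
    ((PySem.List.enumerate cs (i : Int)).filter
      (fun p => !(PySem.Set.ofList skip).contains p.1)).map (·.2) = filtFrom skip cs i := by
  induction cs generalizing i with
  | nil => simp [PySem.List.enumerate_nil, filtFrom]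
  | cons c cs ih =>
    rw [PySem.List.enumerate_cons]
    have hc : ((i : Int) + 1) = ((i + 1 : Nat) : Int) := by push_cast; ring
    rw [List.filter_cons, hc]
    rcases Bool.eq_false_or_eq_true (skip.contains (i : Int)) with h | h
    · -- skipped index: dropped by the filter and by filtFrom
      have hb : (!(PySem.Set.ofList skip).contains ((i : Int), c).1) = false := by
        rw [ofList_contains, h]; rfl
      rw [hb]
      simp only [Bool.false_eq_true, if_false, ih]
      simp only [filtFrom, h, if_true]
    · -- not skipped: kept by the filter, cons in filtFrom
      have hb : (!(PySem.Set.ofList skip).contains ((i : Int), c).1) = true := by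
        rw [ofList_contains, h]; rfl
      rw [hb]
      simp only [if_true, List.map_cons, ih]
      simp only [filtFrom, h, Bool.false_eq_true, if_false]

theorem alphaGo_eq_foldl (sA sZ : List Char) (indA indZ : List Int) (i j : Nat) (sa sz : Int) :
    alphaGo sA sZ (PySem.Set.ofList indZ) (PySem.Set.ofList indA) i j sa sz =
      ((filtFrom indZ (sA.drop i) i).zip (filtFrom indA (sZ.drop j) j)).foldl acStep (sa, sz) := by
  fun_induction alphaGo sA sZ (PySem.Set.ofList indZ) (PySem.Set.ofList indA) i j sa sz with
  | case1 i j sa sz h hskip ih =>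
    rw [List.drop_eq_getElem_cons h.1]
    rw [ofList_contains] at hskip
    simp only [filtFrom, hskip, if_true]
    exact ih
  | case2 i j sa sz h hA hskip ih =>
    rw [List.drop_eq_getElem_cons h.2]
    rw [ofList_contains] at hskip
    conv_rhs => rw [show (filtFrom indA (sZ[j] :: sZ.drop (j+1)) (j:Nat))
        = filtFrom indA (sZ.drop (j+1)) (j+1) by simp only [filtFrom, hskip, if_true]]
    exact ih
  | case3 i j sa sz h hA hZ val hval ih =>
    rw [List.drop_eq_getElem_cons h.1, List.drop_eq_getElem_cons h.2]
    rw [ofList_contains] at hA hZ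
    simp only [Bool.not_eq_true] at hA hZ
    simp only [filtFrom, hA, hZ, Bool.false_eq_true, if_false]
    rw [List.zip_cons_cons, List.foldl_cons, ih]
    simp only [acStep]
    rw [if_pos hval]
  | case4 i j sa sz h hA hZ val hnpos hval ih =>
    rw [List.drop_eq_getElem_cons h.1, List.drop_eq_getElem_cons h.2]
    rw [ofList_contains] at hA hZ
    simp only [Bool.not_eq_true] at hA hZ
    simp only [filtFrom, hA, hZ, Bool.false_eq_true, if_false]
    rw [List.zip_cons_cons, List.foldl_cons, ih]
    simp only [acStep]
    rw [if_neg hnpos, if_pos hval]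
  | case5 i j sa sz h hA hZ val hnpos hnval ih =>
    rw [List.drop_eq_getElem_cons h.1, List.drop_eq_getElem_cons h.2]
    rw [ofList_contains] at hA hZ
    simp only [Bool.not_eq_true] at hA hZ
    simp only [filtFrom, hA, hZ, Bool.false_eq_true, if_false]
    rw [List.zip_cons_cons, List.foldl_cons, ih]
    simp only [acStep]
    rw [if_neg hnpos, if_neg hnval]
  | case6 i j sa sz h =>
    rcases Nat.lt_or_ge i sA.length with hi | hi
    · have hj : sZ.length ≤ j := by omega
      rw [List.drop_eq_nil_of_le hj]
      simp [filtFrom]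
    · rw [List.drop_eq_nil_of_le hi]
      simp [filtFrom]

-- the dict fold of port A is the pair fold acStep, rendered as a two-entry dict
theorem dict_fold_eq (l : List (Char × Char)) (sa sz : Int) :
    (l.foldl
      (fun sc (az : Char × Char) =>
        let val : Int := (az.1.toNat : Int) - (az.2.toNat : Int)
        if val > 0 then sc.modify "A" 0 (· + val)
        else if val < 0 then sc.modify "Z" 0 (· - val)
        else sc) (PySem.Dict.ofList [("A", sa), ("Z", sz)])).items
      = [("A", (l.foldl acStep (sa, sz)).1), ("Z", (l.foldl acStep (sa, sz)).2)] := by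
  induction l generalizing sa sz with
  | nil => rfl
  | cons p l ih =>
    rw [List.foldl_cons, List.foldl_cons]
    have hmod : ∀ (f : Int → Int) (k : String), k = "A" ∨ k = "Z" →
        (PySem.Dict.ofList [("A", sa), ("Z", sz)]).modify k 0 f =
          PySem.Dict.ofList [("A", if k = "A" then f sa else sa),
                             ("Z", if k = "Z" then f sz else sz)] := by
      rintro f k (rfl | rfl) <;> rfl
    simp only [acStep]
    by_cases hpos : ((p.1.toNat : Int) - (p.2.toNat : Int)) > 0
    · rw [if_pos hpos, if_pos hpos, hmod _ "A" (Or.inl rfl)]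
      simp only [reduceIte]
      exact ih _ _
    · rw [if_neg hpos, if_neg hpos]
      by_cases hneg : ((p.1.toNat : Int) - (p.2.toNat : Int)) < 0
      · rw [if_pos hneg, if_pos hneg, hmod _ "Z" (Or.inr rfl)]
        simp only [reduceIte]
        exact ih _ _
      · rw [if_neg hneg, if_neg hneg]
        exact ih _ _

-- ===== VERDICT (by name: the statement is the Claim_ definition above) =====
theorem alpha_clash_spec : Claim_equal_alpha_clash := by
  intro str_A ind_A str_Z ind_Z _
  show alpha_clash str_A ind_A str_Z ind_Z = alpha_clash_alt str_A ind_A str_Z ind_Z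
  unfold alpha_clash alpha_clash_alt
  have h1 := enumerate_filter_eq_filtFrom ind_Z str_A.toList 0
  have h2 := enumerate_filter_eq_filtFrom ind_A str_Z.toList 0
  have h3 := alphaGo_eq_foldl str_A.toList str_Z.toList ind_A ind_Z 0 0 0 0
  simp only [Nat.cast_zero] at h1 h2
  simp only [List.drop_zero] at h3
  simp only [h1, h2, h3, dict_fold_eq]
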